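-- pv_equiv track=rewrite | github.com/sunilsoni/interview-notes-python | com/interview/2024/march/test1/get_request_status1.py | getRequestStatus
-- ===== SOURCE A (Python) =====
-- import collections
-- from collections import deque
--
-- def getRequestStatus(requests):
--     domain_counts = collections.defaultdict(lambda: deque(maxlen=30))  # Set maxlen to 30 for timestamps
--
--     def check_limits(domain):
--         count_5s = sum(1 for timestamp in domain_counts[domain] if timestamp > i - 5)
--         count_30s = sum(1 for timestamp in domain_counts[domain] if timestamp > i - 30)
--         return count_5s < 2 and count_30s < 5
--
--     result = []
--     for i, domain in enumerate(requests):
--         if check_limits(domain):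
--             domain_counts[domain].append(i)  # Update timestamps for accepted requests
--             result.append("{status: 200, message: OK}")
--         else:
--             result.append("{status: 429, message: Too many requests}")
--
--     return result
-- ===== SOURCE B (Python) =====
-- def getRequestStatus(requests):
--     # Per domain keep only the up-to-5 most recent accepted indices, newest first.
--     # Accepted indices are strictly increasing, so "fewer than k accepts in the
--     # last w ticks" holds iff there are fewer than k accepts or the k-th newest
--     # accept is at least w ticks old: an O(1) order-statistic check, no scanning.
--     last5 = {}
--     out = []
--     for i, domain in enumerate(requests):
--         h = last5.get(domain, [])
--         if (len(h) < 2 or h[1] <= i - 5) and (len(h) < 5 or h[4] <= i - 30):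
--             last5[domain] = ([i] + h)[:5]
--             out.append("{status: 200, message: OK}")
--         else:
--             out.append("{status: 429, message: Too many requests}")
--     return out
-- ===== Notes on version B (the rewrite author's own statement) =====
-- stated objective: faster
-- what changed: Instead of rescanning a domain's whole up-to-30-entry timestamp deque twice per request, B keeps only the up-to-5 most recent accepted indices per domain and decides in O(1) by an order-statistic test (2nd newest accept older than 5 ticks, 5th newest older than 30), valid because accepted indices are strictly increasing.
import Mathlib
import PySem

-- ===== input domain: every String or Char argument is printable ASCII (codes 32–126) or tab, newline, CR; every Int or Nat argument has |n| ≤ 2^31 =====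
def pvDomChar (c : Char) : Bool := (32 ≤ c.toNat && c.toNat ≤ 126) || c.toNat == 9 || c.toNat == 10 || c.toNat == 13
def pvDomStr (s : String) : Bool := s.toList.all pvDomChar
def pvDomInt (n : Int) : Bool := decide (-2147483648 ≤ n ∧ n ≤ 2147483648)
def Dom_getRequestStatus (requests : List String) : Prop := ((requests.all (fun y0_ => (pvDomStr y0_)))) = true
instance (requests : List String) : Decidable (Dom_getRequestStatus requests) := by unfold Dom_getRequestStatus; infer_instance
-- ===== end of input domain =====

-- B replaces A's per-request full rescans of a domain's timestamp deque by an O(1)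
-- order-statistic check on the up-to-5 most recent accepted indices (alternative algorithm).

-- ===== PORT A =====
-- for i, domain in enumerate(requests): recursion with an Int counter i.
-- defaultdict(deque(maxlen=30)) ~ Dict with getD _ []; check_limits scans the whole
-- deque twice; append with maxlen=30 drops the oldest element when the deque is full.
-- (defaultdict's key creation on read is unobservable through getD and is not modelled.)
def pvGoA (i : Int) (reqs : List String) (dc : PySem.Dict String (List Int))
    (res : List String) : List String :=
  match reqs with
  | [] => res
  | domain :: rest =>
    let dq := dc.getD domain []
    let count5 := (dq.filter (fun t => decide (i - 5 < t))).length
    let count30 := (dq.filter (fun t => decide (i - 30 < t))).length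
    if count5 < 2 ∧ count30 < 5 then
      let dq' := if dq.length = 30 then dq.tail ++ [i] else dq ++ [i]
      pvGoA (i + 1) rest (dc.insert domain dq') (res ++ ["{status: 200, message: OK}"])
    else
      pvGoA (i + 1) rest dc (res ++ ["{status: 429, message: Too many requests}"])

def getRequestStatus (requests : List String) : List String :=
  pvGoA 0 requests PySem.Dict.empty []

-- ===== PORT B =====
-- per domain, the up-to-5 most recent accepted indices, newest first; accept iff
-- (fewer than 2 accepts or h[1] <= i-5) and (fewer than 5 accepts or h[4] <= i-30);
-- on accept store ([i]+h)[:5].  h[1]/h[4] are guarded by the length tests in Source B's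
-- short-circuit `or`, so the in-range getD is exact.
def pvGoB (i : Int) (reqs : List String) (w : PySem.Dict String (List Int))
    (res : List String) : List String :=
  match reqs with
  | [] => res
  | domain :: rest =>
    let h := w.getD domain []
    if (h.length < 2 ∨ h.getD 1 0 ≤ i - 5) ∧ (h.length < 5 ∨ h.getD 4 0 ≤ i - 30) then
      pvGoB (i + 1) rest (w.insert domain ((i :: h).take 5))
        (res ++ ["{status: 200, message: OK}"])
    else
      pvGoB (i + 1) rest w (res ++ ["{status: 429, message: Too many requests}"])

def getRequestStatus_alt (requests : List String) : List String :=
  pvGoB 0 requests PySem.Dict.empty []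

-- ===== PRECONDITION & SPEC =====
def Spec_getRequestStatus (requests : List String) (out : List String) : Prop := out = getRequestStatus_alt requests
instance (requests : List String) (out : List String) : Decidable (Spec_getRequestStatus requests out) := by unfold Spec_getRequestStatus; infer_instance

-- ===== CLAIM (what is proved, stated in full; the proofs are below) =====
def Claim_equal_getRequestStatus : Prop := ∀ (requests : List String), Dom_getRequestStatus requests → Spec_getRequestStatus requests (getRequestStatus requests)

-- ===== LEMMAS AND PROOFS =====

-- Invariant: A's deque `a` for a domain is strictly increasing with entries < i,
-- and B's record is the 5 most recent entries of `a`, newest first.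
def pvInvD (i : Int) (a h : List Int) : Prop :=
  a.Pairwise (· < ·) ∧ (∀ x ∈ a, x < i) ∧ h = a.reverse.take 5

theorem pvInvD_mono {i j : Int} {a h : List Int}
    (hI : pvInvD i a h) (hij : i ≤ j) : pvInvD j a h :=
  ⟨hI.1, fun x hx => lt_of_lt_of_le (hI.2.1 x hx) hij, hI.2.2⟩

-- For a strictly DECREASING list r and k ≥ 1, "fewer than k elements above c"
-- holds iff r is shorter than k or its k-th element is ≤ c.
theorem pvCountLt (c : Int) (k : Nat) (hk : 1 ≤ k) :
    ∀ (r : List Int), r.Pairwise (· > ·) →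
    (((r.filter (fun t => decide (c < t))).length < k) ↔
      (r.length < k ∨ r.getD (k - 1) 0 ≤ c)) := by
  induction k with
  | zero => omega
  | succ k ih =>
    intro r hp
    match r with
    | [] =>
      constructor
      · intro _; left; simp
      · intro _; simp
    | x :: r =>
      rw [List.pairwise_cons] at hp
      by_cases hc : c < x
      · rw [List.filter_cons_of_pos (by simpa using hc)]
        match k, hk with
        | 0, _ =>
          simp only [List.length_cons, Nat.add_sub_cancel, List.getD_cons_zero]
          constructor
          · intro h; omega
          · intro h; rcases h with h | h <;> omega
        | (k+1), _ =>
          have := ih (by omega) r hp.2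
          simp only [List.length_cons, Nat.add_sub_cancel, List.getD_cons_succ] at this ⊢
          constructor
          · intro h
            rcases (this.1 (by omega)) with h' | h'
            · left; omega
            · right; simpa using h'
          · intro h
            have : (r.filter (fun t => decide (c < t))).length < k + 1 := by
              apply this.2
              rcases h with h | h
              · left; omega
              · right; simpa using h
            omega
      · have hall : ∀ y ∈ x :: r, y ≤ c := by
          intro y hy
          rcases List.mem_cons.1 hy with h | h
          · omega
          · have := hp.1 y h; omega
        have hfil : (x :: r).filter (fun t => decide (c < t)) = [] := by
          apply List.filter_eq_nil_iff.2
          intro y hy; have := hall y hy; simp; omega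
        rw [hfil]
        simp only [List.length_nil]
        constructor
        · intro _
          by_cases hl : (x :: r).length < k + 1
          · left; exact hl
          · right
            have hkk : k + 1 - 1 < (x :: r).length := by omega
            rw [List.getD_eq_getElem _ _ hkk]
            exact hall _ (List.getElem_mem hkk)
        · intro _; omega

-- bridge from the take-5 record to the full reversed deque, for k ≤ 5
theorem pvTake5 (r : List Int) (c : Int) (k : Nat) (hk1 : 1 ≤ k) (hk : k ≤ 5) :
    (((r.take 5).length < k ∨ (r.take 5).getD (k - 1) 0 ≤ c) ↔
      (r.length < k ∨ r.getD (k - 1) 0 ≤ c)) := by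
  by_cases hl : r.length < k
  · constructor
    · intro _; left; exact hl
    · intro _; left; simp [List.length_take]; omega
  · have hlt : (r.take 5).length < k ↔ False := by
      simp [List.length_take]; omega
    have hkk : k - 1 < r.length := by omega
    have hkk5 : k - 1 < (r.take 5).length := by simp [List.length_take]; omega
    have hget : (r.take 5).getD (k - 1) 0 = r.getD (k - 1) 0 := by
      rw [List.getD_eq_getElem _ _ hkk5, List.getD_eq_getElem _ _ hkk,
        List.getElem_take]
    rw [hget]
    constructor
    · intro h; rcases h with h | h
      · exact absurd h (by simpa using hlt)
      · right; exact h
    · intro h; rcases h with h | h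
      · omega
      · right; exact h

theorem pvPairwise_append_lt {a : List Int} {i : Int}
    (hs : a.Pairwise (· < ·)) (hb : ∀ x ∈ a, x < i) :
    (a ++ [i]).Pairwise (· < ·) := by
  rw [List.pairwise_append]
  exact ⟨hs, List.pairwise_singleton _ _, fun x hx y hy => by
    simp at hy; subst hy; exact hb x hx⟩

-- the take-5 record after an accept: (i :: h).take 5 tracks A's updated deque
theorem pvRecord_step (a : List Int) (i : Int) :
    (i :: (a.reverse.take 5)).take 5 =
      ((if a.length = 30 then a.tail ++ [i] else a ++ [i]).reverse).take 5 := by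
  by_cases h30 : a.length = 30
  · rw [if_pos h30]
    match a, h30 with
    | x :: t, h30 =>
      have h1 : ((x :: t).reverse) = t.reverse ++ [x] := by simp
      have h2 : (((x :: t).tail ++ [i]).reverse) = i :: t.reverse := by simp
      rw [h1, h2, List.take_succ_cons, List.take_succ_cons, List.take_take]
      norm_num
      simp only [List.length_cons] at h30
      omega
  · rw [if_neg h30]
    have h2 : ((a ++ [i]).reverse) = i :: a.reverse := by simp
    rw [h2, List.take_succ_cons, List.take_succ_cons, List.take_take]
    norm_num

-- the record after an accept equals the record of A's updated deque
-- Main simulation lemma.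
theorem pvGo_eq : ∀ (reqs : List String) (i : Int)
    (dcA : PySem.Dict String (List Int)) (w : PySem.Dict String (List Int))
    (res : List String),
    (∀ d, pvInvD i (dcA.getD d []) (w.getD d [])) →
    pvGoA i reqs dcA res = pvGoB i reqs w res := by
  intro reqs
  induction reqs with
  | nil => intro i dcA w res _; rfl
  | cons domain rest ih =>
    intro i dcA w res hinv
    obtain ⟨hs, hlt, hrec⟩ := hinv domain
    set a := dcA.getD domain [] with ha
    set h := w.getD domain [] with hh
    have hdec : a.reverse.Pairwise (· > ·) := by
      rw [List.pairwise_reverse]; exact hs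
    have hflen : ∀ c : Int, (a.filter (fun t => decide (c < t))).length =
        (a.reverse.filter (fun t => decide (c < t))).length := by
      intro c; rw [List.filter_reverse, List.length_reverse]
    have hcond5 : ((a.filter (fun t => decide (i - 5 < t))).length < 2) ↔
        (h.length < 2 ∨ h.getD 1 0 ≤ i - 5) := by
      rw [hflen, pvCountLt (i - 5) 2 (by omega) a.reverse hdec, hrec,
        pvTake5 a.reverse (i - 5) 2 (by omega) (by omega)]
    have hcond30 : ((a.filter (fun t => decide (i - 30 < t))).length < 5) ↔
        (h.length < 5 ∨ h.getD 4 0 ≤ i - 30) := by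
      rw [hflen, pvCountLt (i - 30) 5 (by omega) a.reverse hdec, hrec,
        pvTake5 a.reverse (i - 30) 5 (by omega) (by omega)]
    show pvGoA i (domain :: rest) dcA res = pvGoB i (domain :: rest) w res
    rw [pvGoA, pvGoB]
    simp only [← ha, ← hh]
    by_cases hok : (a.filter (fun t => decide (i - 5 < t))).length < 2 ∧
        (a.filter (fun t => decide (i - 30 < t))).length < 5
    · have hB : (h.length < 2 ∨ h.getD 1 0 ≤ i - 5) ∧ (h.length < 5 ∨ h.getD 4 0 ≤ i - 30) :=
        ⟨hcond5.1 hok.1, hcond30.1 hok.2⟩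
      rw [if_pos hok, if_pos hB]
      apply ih
      intro d
      by_cases hdd : d = domain
      · subst hdd
        rw [PySem.Dict.getD_insert, PySem.Dict.getD_insert, if_pos rfl, if_pos rfl]
        refine ⟨?_, ?_, by rw [hrec]; exact pvRecord_step a i⟩
        · by_cases h30 : a.length = 30
          · rw [if_pos h30]
            exact pvPairwise_append_lt (hs.sublist (List.tail_sublist a))
              (fun x hx => hlt x (List.mem_of_mem_tail hx))
          · rw [if_neg h30]
            exact pvPairwise_append_lt hs hlt
        · intro x hx
          by_cases h30 : a.length = 30
          · rw [if_pos h30] at hx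
            rcases List.mem_append.1 hx with hx | hx
            · have := hlt x (List.mem_of_mem_tail hx); omega
            · simp at hx; omega
          · rw [if_neg h30] at hx
            rcases List.mem_append.1 hx with hx | hx
            · have := hlt x hx; omega
            · simp at hx; omega
      · rw [PySem.Dict.getD_insert, PySem.Dict.getD_insert, if_neg hdd, if_neg hdd]
        exact pvInvD_mono (hinv d) (by omega)
    · rw [if_neg hok, if_neg (by
        intro hB
        exact hok ⟨hcond5.2 hB.1, hcond30.2 hB.2⟩)]
      apply ih
      intro d
      exact pvInvD_mono (hinv d) (by omega)

-- ===== VERDICT (by name: the statement is the Claim_ definition above) =====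
theorem getRequestStatus_spec : Claim_equal_getRequestStatus := by
  intro requests _
  show getRequestStatus requests = getRequestStatus_alt requests
  unfold getRequestStatus getRequestStatus_alt
  apply pvGo_eq
  intro d
  simp only [PySem.Dict.getD_empty]
  exact ⟨List.Pairwise.nil, by simp, by simp⟩
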